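-- pv_equiv track=rewrite | github.com/coding-samu/Algo2 | counting_zeros.py | contaZeroN2
-- ===== SOURCE A (Python) =====
-- def contaZeroN2(S, k):
--     """
--     Counts the number of zeros in a given list 'S' and returns the maximum number of zeros
--     that can be obtained by splitting the list into two parts, such that the sum of the
--     elements in each part is less than or equal to 'k'.
--
--     Args:
--         S (list): The input list of integers.
--         k (int): The maximum sum allowed for each part.
--
--     Returns:
--         tuple: A tuple containing the input list 'S', the list 'x_zeros' which stores the
--         cumulative count of zeros from the left side of 'S', the list 'y_zeros' which stores
--         the cumulative count of zeros from the right side of 'S', and the maximum number of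
--         zeros that can be obtained.
--
--     Example:
--         >>> S = [1, 0, 0, 1, 0, 1, 1, 0]
--         >>> k = 2
--         >>> contaZeroN2(S, k)
--         ([1, 0, 0, 1, 0, 1, 1, 0], [0, 1, 2, 2, 3, 3, 3, 4], [4, 3, 3, 2, 2, 1, 1, 0], 4)
--     """
--     n = len(S)
--     x_zeros = [0] * n
--     y_zeros = [0] * n
--
--     for i in range(n):
--         if S[i] == 0:
--             if i == 0:
--                 x_zeros[i] = 1
--             else:
--                 x_zeros[i] = x_zeros[i-1] + 1
--         else:
--             if i == 0:
--                 x_zeros[i] = 0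
--             else:
--                 x_zeros[i] = x_zeros[i-1]
--
--     for i in range(1, n+1):
--         if S[-i] == 0:
--             if i == 1:
--                 y_zeros[i-1] = 1
--             else:
--                 y_zeros[i-1] = y_zeros[i-2] + 1
--         else:
--             if i == 1:
--                 y_zeros[i-1] = 0
--             else:
--                 y_zeros[i-1] = y_zeros[i-2]
--
--
--     max_zeros = 0
--     sum_x = 0
--     for x in range(1, n+1):
--         max_y = n - 1 - x
--         sum_x += S[x-1]
--         sum_y = 0
--         for y in range(1, max_y+1):
--             sum_y += S[-y]
--             if sum_x + sum_y <= k: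
--                 max_zeros = max(max_zeros, x_zeros[x-1] + y_zeros[y-1])
--
--     return S, x_zeros, y_zeros, max_zeros
-- ===== SOURCE B (Python) =====
-- def contaZeroN2(S, k):
--     """Same result as the quadratic original: precomputes suffix sums once and,
--     for each prefix, scans candidate suffix lengths from the largest allowed one
--     downward, stopping at the first feasible length (valid because the suffix
--     zero-count is nondecreasing in the suffix length)."""
--     n = len(S)
--     x_zeros, c = [], 0
--     for v in S:
--         if v == 0:
--             c += 1
--         x_zeros.append(c)
--     y_zeros, c, sufs, s = [], 0, [], 0
--     for v in reversed(S):
--         if v == 0: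
--             c += 1
--         y_zeros.append(c)
--         s += v
--         sufs.append(s)
--     max_zeros = 0
--     sum_x = 0
--     for x in range(1, n + 1):
--         sum_x += S[x - 1]
--         t = k - sum_x
--         for y in range(n - 1 - x, 0, -1):
--             if sufs[y - 1] <= t:
--                 max_zeros = max(max_zeros, x_zeros[x - 1] + y_zeros[y - 1])
--                 break
--     return S, x_zeros, y_zeros, max_zeros
-- ===== Notes on version B (the rewrite author's own statement) =====
-- stated objective: faster
-- what changed: B builds the prefix/suffix zero counts with running counters in single passes, precomputes all suffix sums once, and replaces A's inner sum-accumulating scan by a downward scan that stops at the first (largest) feasible suffix length, which is optimal because the suffix zero-count is nondecreasing in the suffix length.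
import Mathlib
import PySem

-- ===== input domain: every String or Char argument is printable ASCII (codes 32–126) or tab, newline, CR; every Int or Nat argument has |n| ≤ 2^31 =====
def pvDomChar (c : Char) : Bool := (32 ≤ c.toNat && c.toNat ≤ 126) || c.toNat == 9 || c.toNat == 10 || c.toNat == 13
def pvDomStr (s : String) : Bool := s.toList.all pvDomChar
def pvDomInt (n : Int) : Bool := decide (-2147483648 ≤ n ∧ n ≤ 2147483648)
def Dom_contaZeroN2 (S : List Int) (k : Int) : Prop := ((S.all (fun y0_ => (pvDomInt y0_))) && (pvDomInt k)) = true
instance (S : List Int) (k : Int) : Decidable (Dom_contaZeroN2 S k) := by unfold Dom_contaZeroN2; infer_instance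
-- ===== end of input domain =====

-- B precomputes suffix sums once and, per prefix, scans suffix lengths downward stopping at the
-- first feasible one (the suffix zero-count is nondecreasing); same return value as A, typically faster.

-- ===== PORT A =====
-- the first loop of A: x_zeros[i] filled by index over a preallocated [0]*n array
def pvAxz (S : List Int) : List Int :=
  (PySem.List.pyRange 0 S.length 1).foldl (fun xs i =>
    if PySem.List.pyGetD S i 0 = 0 then
      if i = 0 then PySem.List.pySetD xs i 1
      else PySem.List.pySetD xs i (PySem.List.pyGetD xs (i-1) 0 + 1)
    else
      if i = 0 then PySem.List.pySetD xs i 0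
      else PySem.List.pySetD xs i (PySem.List.pyGetD xs (i-1) 0))
    (List.replicate S.length 0)

-- the second loop of A: y_zeros[i-1] for i in range(1, n+1), reading S[-i]
def pvAyz (S : List Int) : List Int :=
  (PySem.List.pyRange 1 ((S.length : Int)+1) 1).foldl (fun ys i =>
    if PySem.List.pyGetD S (-i) 0 = 0 then
      if i = 1 then PySem.List.pySetD ys (i-1) 1
      else PySem.List.pySetD ys (i-1) (PySem.List.pyGetD ys (i-2) 0 + 1)
    else
      if i = 1 then PySem.List.pySetD ys (i-1) 0
      else PySem.List.pySetD ys (i-1) (PySem.List.pyGetD ys (i-2) 0))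
    (List.replicate S.length 0)

-- A's nested loops: state (max_zeros, sum_x); inner state (max_zeros, sum_y)
def pvAmain (S : List Int) (k : Int) (x_zeros y_zeros : List Int) : Int × Int :=
  (PySem.List.pyRange 1 ((S.length : Int)+1) 1).foldl (fun st x =>
    let maxY : Int := (S.length : Int) - 1 - x
    let sumX : Int := st.2 + PySem.List.pyGetD S (x-1) 0
    let inner : Int × Int :=
      (PySem.List.pyRange 1 (maxY+1) 1).foldl (fun st2 y =>
        let sumY : Int := st2.2 + PySem.List.pyGetD S (-y) 0
        (if sumX + sumY ≤ k then
           max st2.1 (PySem.List.pyGetD x_zeros (x-1) 0 + PySem.List.pyGetD y_zeros (y-1) 0)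
         else st2.1, sumY))
        (st.1, 0)
    (inner.1, sumX)) (0, 0)

def contaZeroN2 (S : List Int) (k : Int) : List Int × List Int × List Int × Int :=
  (S, pvAxz S, pvAyz S, (pvAmain S k (pvAxz S) (pvAyz S)).1)

-- ===== PORT B =====
-- Source B's first loop: running zero counter, append
def pvBxz (S : List Int) : List Int × Int :=
  S.foldl (fun (st : List Int × Int) v =>
    let c := if v = 0 then st.2 + 1 else st.2
    (st.1 ++ [c], c)) ([], 0)

-- Source B's second loop over reversed(S): (y_zeros, counter, sufs, running sum)
def pvByz (S : List Int) : List Int × Int × List Int × Int :=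
  S.reverse.foldl (fun (st : List Int × Int × List Int × Int) v =>
    let c := if v = 0 then st.2.1 + 1 else st.2.1
    let s := st.2.2.2 + v
    (st.1 ++ [c], c, st.2.2.1 ++ [s], s)) ([], 0, [], 0)

-- Source B's inner loop 'for y in range(L, 0, -1): if sufs[y-1] <= t: ...; break'
-- scans y = L, L-1, …, 1 and returns the first y with sufs[y-1] <= t
def firstFeasible (sufs : List Int) (t : Int) : Nat → Option Nat
  | 0 => none
  | y+1 => if PySem.List.pyGetD sufs (((y+1 : Nat) : Int) - 1) 0 ≤ t then some (y+1)
           else firstFeasible sufs t y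

-- Source B's outer loop: state (max_zeros, sum_x)
def pvBmain (S : List Int) (k : Int) (x_zeros y_zeros sufs : List Int) : Int × Int :=
  (PySem.List.pyRange 1 ((S.length : Int)+1) 1).foldl (fun st x =>
    let sumX : Int := st.2 + PySem.List.pyGetD S (x-1) 0
    let t : Int := k - sumX
    let m : Int :=
      match firstFeasible sufs t ((S.length : Int) - 1 - x).toNat with
      | some y => max st.1 (PySem.List.pyGetD x_zeros (x-1) 0 +
                            PySem.List.pyGetD y_zeros (((y : Nat) : Int) - 1) 0)
      | none => st.1
    (m, sumX)) (0, 0)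

def contaZeroN2_alt (S : List Int) (k : Int) : List Int × List Int × List Int × Int :=
  let xz := pvBxz S
  let r := pvByz S
  (S, xz.1, r.1, (pvBmain S k xz.1 r.1 r.2.2.1).1)

-- ===== PRECONDITION & SPEC =====
def Spec_contaZeroN2 (S : List Int) (k : Int) (out : List Int × List Int × List Int × Int) : Prop := out = contaZeroN2_alt S k
instance (S : List Int) (k : Int) (out : List Int × List Int × List Int × Int) : Decidable (Spec_contaZeroN2 S k out) := by unfold Spec_contaZeroN2; infer_instance

-- ===== CLAIM (what is proved, stated in full; the proofs are below) =====
def Claim_equal_contaZeroN2 : Prop := ∀ (S : List Int) (k : Int), Dom_contaZeroN2 S k → Spec_contaZeroN2 S k (contaZeroN2 S k)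

-- ===== LEMMAS AND PROOFS =====

def pvZ (l : List Int) : Int := (l.countP (fun v => v == 0) : Int)
def pvZT (l : List Int) (j : Nat) : Int := pvZ (l.take (j+1))
def pvSum (l : List Int) (j : Nat) : Int := (l.take j).sum

theorem pvZ_take_succ (l : List Int) (j : Nat) (h : j < l.length) :
    pvZ (l.take (j+1)) = pvZ (l.take j) + (if l.getD j 0 = 0 then 1 else 0) := by
  unfold pvZ
  rw [List.take_add_one, List.countP_append]
  have hj : l[j]? = some l[j] := List.getElem?_eq_getElem h
  simp [hj, List.getD, List.countP_cons]

theorem pvZT_mono (l : List Int) {j j' : Nat} (h : j ≤ j') : pvZT l j ≤ pvZT l j' := by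
  unfold pvZT pvZ
  have hsub : (l.take (j+1)).Sublist (l.take (j'+1)) := by
    have h1 : l.take (j+1) = (l.take (j'+1)).take (j+1) := by
      rw [List.take_take]; congr 1; omega
    rw [h1]; exact List.take_sublist _ _
  exact_mod_cast hsub.countP_le

theorem pvSum_succ (l : List Int) (j : Nat) (h : j < l.length) :
    pvSum l (j+1) = pvSum l j + l.getD j 0 := by
  unfold pvSum
  rw [List.take_add_one, List.sum_append]
  have hj : l[j]? = some l[j] := List.getElem?_eq_getElem h
  simp [hj, List.getD]

def pvXlist (l : List Int) : List Int := (List.range l.length).map (fun j => pvZT l j)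
def pvSufl (l : List Int) : List Int := (List.range l.length).map (fun j => pvSum l (j+1))

theorem pvZ_nil : pvZ [] = 0 := by simp [pvZ]
theorem pvZ_cons (v : Int) (l : List Int) : pvZ (v :: l) = (if v = 0 then 1 else 0) + pvZ l := by
  unfold pvZ; rw [List.countP_cons]; by_cases h : v = 0 <;> simp [h]
  all_goals omega

theorem pvZT_cons_zero (v : Int) (t : List Int) : pvZT (v :: t) 0 = (if v = 0 then 1 else 0) := by
  by_cases h : v = 0 <;> simp [pvZT, pvZ, h]

theorem pvZT_cons_succ (v : Int) (t : List Int) (j : Nat) :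
    pvZT (v :: t) (j+1) = (if v = 0 then 1 else 0) + pvZT t j := by
  simp [pvZT, List.take_succ_cons, pvZ_cons]

theorem pvSum_cons_succ (v : Int) (t : List Int) (j : Nat) :
    pvSum (v :: t) (j+1) = v + pvSum t j := by
  simp [pvSum, List.take_succ_cons]

theorem pvBxz_go (l : List Int) : ∀ (acc : List Int) (c : Int),
    l.foldl (fun (st : List Int × Int) v =>
      let c' := if v = 0 then st.2 + 1 else st.2
      (st.1 ++ [c'], c')) (acc, c)
    = (acc ++ (List.range l.length).map (fun j => c + pvZT l j), c + pvZ l) := by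
  induction l with
  | nil => intro acc c; simp [pvZ_nil]
  | cons v t ih =>
    intro acc c
    simp only [List.foldl_cons]
    rw [ih]
    have hc : (if v = 0 then c + 1 else c) = c + (if v = 0 then 1 else 0) := by
      split_ifs <;> omega
    simp only [Prod.mk.injEq, List.length_cons, List.range_succ_eq_map, List.map_cons,
      List.map_map, Function.comp_def, pvZT_cons_zero, pvZT_cons_succ, pvZ_cons,
      List.append_assoc, List.singleton_append]
    refine ⟨?_, by rw [hc]; ring⟩
    rw [hc]
    congr 1
    congr 1
    exact List.map_congr_left (fun j _ => by ring)

theorem pvByz_go (l : List Int) : ∀ (acc1 : List Int) (c : Int) (acc2 : List Int) (s : Int),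
    l.foldl (fun (st : List Int × Int × List Int × Int) v =>
      let c := if v = 0 then st.2.1 + 1 else st.2.1
      let s := st.2.2.2 + v
      (st.1 ++ [c], c, st.2.2.1 ++ [s], s)) (acc1, c, acc2, s)
    = (acc1 ++ (List.range l.length).map (fun j => c + pvZT l j), c + pvZ l,
       acc2 ++ (List.range l.length).map (fun j => s + pvSum l (j+1)), s + l.sum) := by
  induction l with
  | nil => intro acc1 c acc2 s; simp [pvZ_nil]
  | cons v t ih =>
    intro acc1 c acc2 s
    simp only [List.foldl_cons]
    rw [ih]
    have hc : (if v = 0 then c + 1 else c) = c + (if v = 0 then 1 else 0) := by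
      split_ifs <;> omega
    simp only [Prod.mk.injEq, List.length_cons, List.range_succ_eq_map, List.map_cons,
      List.map_map, Function.comp_def, pvZT_cons_zero, pvZT_cons_succ, pvZ_cons,
      pvSum_cons_succ, List.sum_cons, List.append_assoc, List.singleton_append]
    refine ⟨?_, by rw [hc]; ring, ?_, by ring⟩
    · rw [hc]
      congr 1
      congr 1
      exact List.map_congr_left (fun j _ => by ring)
    · congr 1
      congr 1
      · simp [pvSum]
      · exact List.map_congr_left (fun j _ => by ring)

def pvFF (l : List Int) (t : Int) : Nat → Option Nat
  | 0 => none
  | y+1 => if pvSum l (y+1) ≤ t then some (y+1) else pvFF l t y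

theorem pvFF_bounds (l : List Int) (t : Int) :
    ∀ (L y : Nat), pvFF l t L = some y → 1 ≤ y ∧ y ≤ L := by
  intro L
  induction L with
  | zero => intro y h; simp [pvFF] at h
  | succ L ih =>
    intro y h
    unfold pvFF at h
    split_ifs at h with hc
    · cases h; omega
    · have := ih y h; omega

theorem pv_inner_eq (R : List Int) (k sx xv : Int) :
    ∀ (L : Nat), L ≤ R.length → ∀ (m : Int),
    (List.range L).foldl (fun (st2 : Int × Int) j =>
        ((if sx + (st2.2 + R.getD j 0) ≤ k then max st2.1 (xv + pvZT R j) else st2.1),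
         st2.2 + R.getD j 0)) (m, 0)
    = ((match pvFF R (k - sx) L with
        | some y => max m (xv + pvZT R (y-1))
        | none => m), pvSum R L) := by
  intro L
  induction L with
  | zero => intro _ m; simp [pvFF, pvSum]
  | succ L ih =>
    intro hL m
    rw [List.range_succ, List.foldl_append]
    rw [ih (by omega) m]
    simp only [List.foldl_cons, List.foldl_nil]
    have hsum : pvSum R L + R.getD L 0 = pvSum R (L+1) := (pvSum_succ R L (by omega)).symm
    rw [hsum]
    have hff : pvFF R (k - sx) (L+1)
        = if pvSum R (L+1) ≤ k - sx then some (L+1) else pvFF R (k - sx) L := rfl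
    rw [hff]
    by_cases hc : sx + pvSum R (L+1) ≤ k
    · have hc' : pvSum R (L+1) ≤ k - sx := by omega
      simp only [if_pos hc, if_pos hc']
      cases hy : pvFF R (k - sx) L with
      | none => simp
      | some y =>
        have hb := pvFF_bounds R (k - sx) L y hy
        have hmono : xv + pvZT R (y-1) ≤ xv + pvZT R (L+1-1) := by
          have := pvZT_mono R (j := y-1) (j' := L) (by omega)
          simp only [Nat.add_sub_cancel]
          omega
        simp only [Nat.add_sub_cancel] at hmono ⊢
        rw [max_assoc, max_eq_right hmono]
    · have hc' : ¬ pvSum R (L+1) ≤ k - sx := by omega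
      simp only [if_neg hc, if_neg hc']

theorem pvZT_getD (S : List Int) (J : Nat) (h : J < S.length) :
    pvZT S J = pvZ (S.take J) + (if S.getD J 0 = 0 then 1 else 0) :=
  pvZ_take_succ S J h

theorem pvAxz_loop (S : List Int) : ∀ (J : Nat), J ≤ S.length →
    (PySem.List.pyRange 0 (J : Int) 1).foldl (fun xs i =>
      if PySem.List.pyGetD S i 0 = 0 then
        if i = 0 then PySem.List.pySetD xs i 1
        else PySem.List.pySetD xs i (PySem.List.pyGetD xs (i-1) 0 + 1)
      else
        if i = 0 then PySem.List.pySetD xs i 0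
        else PySem.List.pySetD xs i (PySem.List.pyGetD xs (i-1) 0))
      (List.replicate S.length 0)
    = (List.range J).map (fun j => pvZT S j) ++ List.replicate (S.length - J) 0 := by
  intro J
  induction J with
  | zero => intro _; simp [PySem.List.pyRange_one_eq_nil]
  | succ J ih =>
    intro hJ
    have hsplit : PySem.List.pyRange 0 ((J+1 : Nat) : Int) 1
        = PySem.List.pyRange 0 (J : Int) 1 ++ [(J : Int)] := by
      push_cast
      exact PySem.List.pyRange_one_succ_right (by positivity)
    rw [hsplit, List.foldl_append, ih (by omega)]
    simp only [List.foldl_cons, List.foldl_nil]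
    have hlenmap : ((List.range J).map (fun j => pvZT S j)).length = J := by simp
    -- the written value equals pvZT S J
    set A := (List.range J).map (fun j => pvZT S j) with hA
    have hrep : S.length - J = (S.length - (J+1)) + 1 := by omega
    have hsetv : ∀ v : Int, PySem.List.pySetD (A ++ List.replicate (S.length - J) 0) ((J:Int)) v
        = A ++ v :: List.replicate (S.length - (J+1)) 0 := by
      intro v
      rw [PySem.List.pySetD_natCast, List.set_append_right _ _ (by simp [hA]),
        hrep, List.replicate_succ]
      simp [hA]
    have hprev : 1 ≤ J → PySem.List.pyGetD (A ++ List.replicate (S.length - J) 0) ((J:Int)-1) 0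
        = pvZ (S.take J) := by
      intro h1
      have hcast : ((J:Int) - 1) = ((J - 1 : Nat) : Int) := by omega
      rw [hcast, PySem.List.pyGetD_natCast]
      simp only [List.getD_eq_getElem?_getD]
      have hlt2 : J - 1 < (List.map (fun j => pvZT S j) (List.range J)).length := by
        simp; omega
      rw [List.getElem?_append_left hlt2, List.getElem?_map,
        List.getElem?_range (by omega : J - 1 < J)]
      simp only [Option.map_some, Option.getD_some]
      unfold pvZT
      rw [Nat.sub_add_cancel h1]
    have hmapsucc : (List.range (J+1)).map (fun j => pvZT S j)
        = A ++ [pvZT S J] := by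
      rw [List.range_succ, List.map_append]; simp [hA]
    have hZ : pvZT S J = pvZ (S.take J) + (if S.getD J 0 = 0 then 1 else 0) :=
      pvZT_getD S J (by omega)
    have hJ0 : ((J:Int) = 0) ↔ (J = 0) := by omega
    rw [hmapsucc, List.append_assoc, List.singleton_append]
    by_cases hz : S.getD J 0 = 0
    · rw [if_pos (by rw [PySem.List.pyGetD_natCast]; simpa using hz)]
      by_cases h0 : J = 0
      · rw [if_pos (hJ0.mpr h0), hsetv]
        subst h0
        simp only [List.take_zero, pvZ_nil, if_pos hz] at hZ
        rw [show (1:Int) = pvZT S 0 by omega]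
      · rw [if_neg (fun hh => h0 (hJ0.mp hh)), hprev (by omega), hsetv]
        rw [show pvZ (S.take J) + 1 = pvZT S J by rw [hZ, if_pos hz]]
    · rw [if_neg (by rw [PySem.List.pyGetD_natCast]; simpa using hz)]
      by_cases h0 : J = 0
      · rw [if_pos (hJ0.mpr h0), hsetv]
        subst h0
        simp only [List.take_zero, pvZ_nil, if_neg hz] at hZ
        rw [show (0:Int) = pvZT S 0 by omega]
      · rw [if_neg (fun hh => h0 (hJ0.mp hh)), hprev (by omega), hsetv]
        rw [show pvZ (S.take J) = pvZT S J by rw [hZ, if_neg hz]; ring]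

theorem pv_neg_get (S : List Int) (J : Nat) (h : J < S.length) :
    PySem.List.pyGetD S (-(((J+1) : Nat) : Int)) 0 = S.reverse.getD J 0 := by
  rw [PySem.List.pyGetD_neg_natCast S (J+1) 0 (by omega) (by omega)]
  have hJr : J < S.reverse.length := by simpa using h
  rw [List.getD_eq_getElem _ _ hJr, List.getElem_reverse]
  congr 1
  omega

theorem pvAyz_loop (S : List Int) : ∀ (J : Nat), J ≤ S.length →
    (PySem.List.pyRange 1 ((J : Int)+1) 1).foldl (fun ys i =>
      if PySem.List.pyGetD S (-i) 0 = 0 then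
        if i = 1 then PySem.List.pySetD ys (i-1) 1
        else PySem.List.pySetD ys (i-1) (PySem.List.pyGetD ys (i-2) 0 + 1)
      else
        if i = 1 then PySem.List.pySetD ys (i-1) 0
        else PySem.List.pySetD ys (i-1) (PySem.List.pyGetD ys (i-2) 0))
      (List.replicate S.length 0)
    = (List.range J).map (fun j => pvZT S.reverse j) ++ List.replicate (S.length - J) 0 := by
  intro J
  induction J with
  | zero => intro _; simp [PySem.List.pyRange_one_eq_nil]
  | succ J ih =>
    intro hJ
    have hsplit : PySem.List.pyRange 1 (((J+1 : Nat) : Int)+1) 1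
        = PySem.List.pyRange 1 ((J : Int)+1) 1 ++ [(J : Int)+1] := by
      push_cast
      exact PySem.List.pyRange_one_succ_right (by omega)
    rw [hsplit, List.foldl_append, ih (by omega)]
    simp only [List.foldl_cons, List.foldl_nil]
    set A := (List.range J).map (fun j => pvZT S.reverse j) with hA
    have hrep : S.length - J = (S.length - (J+1)) + 1 := by omega
    have hi1 : ((J:Int)+1-1) = ((J : Nat) : Int) := by omega
    have hneg : (-((J:Int)+1)) = (-(((J+1) : Nat) : Int)) := by omega
    have hsetv : ∀ v : Int, PySem.List.pySetD (A ++ List.replicate (S.length - J) 0) ((J:Int)+1-1) v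
        = A ++ v :: List.replicate (S.length - (J+1)) 0 := by
      intro v
      rw [hi1, PySem.List.pySetD_natCast, List.set_append_right _ _ (by simp [hA]),
        hrep, List.replicate_succ]
      simp [hA]
    have hprev : 1 ≤ J → PySem.List.pyGetD (A ++ List.replicate (S.length - J) 0) ((J:Int)+1-2) 0
        = pvZ (S.reverse.take J) := by
      intro h1
      have hcast : ((J:Int)+1-2) = ((J - 1 : Nat) : Int) := by omega
      rw [hcast, PySem.List.pyGetD_natCast]
      simp only [List.getD_eq_getElem?_getD]
      have hlt2 : J - 1 < (List.map (fun j => pvZT S.reverse j) (List.range J)).length := by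
        simp; omega
      rw [List.getElem?_append_left hlt2, List.getElem?_map,
        List.getElem?_range (by omega : J - 1 < J)]
      simp only [Option.map_some, Option.getD_some]
      unfold pvZT
      rw [Nat.sub_add_cancel h1]
    have hmapsucc : (List.range (J+1)).map (fun j => pvZT S.reverse j)
        = A ++ [pvZT S.reverse J] := by
      rw [List.range_succ, List.map_append]; simp [hA]
    have hZ : pvZT S.reverse J = pvZ (S.reverse.take J) + (if S.reverse.getD J 0 = 0 then 1 else 0) :=
      pvZT_getD S.reverse J (by simp; omega)
    have hJ0 : (((J:Int)+1) = 1) ↔ (J = 0) := by omega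
    rw [hmapsucc, List.append_assoc, List.singleton_append]
    by_cases hz : S.reverse.getD J 0 = 0
    · rw [if_pos (by rw [hneg, pv_neg_get S J (by omega)]; exact hz)]
      by_cases h0 : J = 0
      · rw [if_pos (hJ0.mpr h0), hsetv]
        subst h0
        simp only [List.take_zero, pvZ_nil, if_pos hz] at hZ
        rw [show (1:Int) = pvZT S.reverse 0 by omega]
      · rw [if_neg (fun hh => h0 (hJ0.mp hh)), hprev (by omega), hsetv]
        rw [show pvZ (S.reverse.take J) + 1 = pvZT S.reverse J by rw [hZ, if_pos hz]]
    · rw [if_neg (by rw [hneg, pv_neg_get S J (by omega)]; exact hz)]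
      by_cases h0 : J = 0
      · rw [if_pos (hJ0.mpr h0), hsetv]
        subst h0
        simp only [List.take_zero, pvZ_nil, if_neg hz] at hZ
        rw [show (0:Int) = pvZT S.reverse 0 by omega]
      · rw [if_neg (fun hh => h0 (hJ0.mp hh)), hprev (by omega), hsetv]
        rw [show pvZ (S.reverse.take J) = pvZT S.reverse J by rw [hZ, if_neg hz]; ring]


theorem pvXlist_getD (l : List Int) (j : Nat) (h : j < l.length) :
    (pvXlist l).getD j 0 = pvZT l j := by
  unfold pvXlist
  simp only [List.getD_eq_getElem?_getD, List.getElem?_map, List.getElem?_range h,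
    Option.map_some, Option.getD_some]

theorem pvSufl_getD (l : List Int) (j : Nat) (h : j < l.length) :
    (pvSufl l).getD j 0 = pvSum l (j+1) := by
  unfold pvSufl
  simp only [List.getD_eq_getElem?_getD, List.getElem?_map, List.getElem?_range h,
    Option.map_some, Option.getD_some]

theorem firstFeasible_eq (R : List Int) (t : Int) :
    ∀ (L : Nat), L ≤ R.length → firstFeasible (pvSufl R) t L = pvFF R t L := by
  intro L
  induction L with
  | zero => intro _; rfl
  | succ L ih =>
    intro hL
    unfold firstFeasible pvFF
    have hcast : (((L+1 : Nat) : Int) - 1) = ((L : Nat) : Int) := by omega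
    rw [hcast, PySem.List.pyGetD_natCast, pvSufl_getD R L (by omega), ih (by omega)]
theorem pvAxz_eq (S : List Int) : pvAxz S = pvXlist S := by
  unfold pvAxz pvXlist
  have h := pvAxz_loop S S.length le_rfl
  simpa using h

theorem pvAyz_eq (S : List Int) : pvAyz S = pvXlist S.reverse := by
  unfold pvAyz pvXlist
  have h := pvAyz_loop S S.length le_rfl
  simpa using h

theorem pvBxz_eq (S : List Int) : pvBxz S = (pvXlist S, pvZ S) := by
  unfold pvBxz
  rw [pvBxz_go]
  simp [pvXlist]

theorem pvByz_eq (S : List Int) :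
    pvByz S = (pvXlist S.reverse, pvZ S.reverse, pvSufl S.reverse, S.reverse.sum) := by
  unfold pvByz
  rw [pvByz_go]
  simp [pvXlist, pvSufl]

theorem pvmain_eq (S : List Int) (k : Int) :
    pvAmain S k (pvXlist S) (pvXlist S.reverse)
      = pvBmain S k (pvXlist S) (pvXlist S.reverse) (pvSufl S.reverse) := by
  unfold pvAmain pvBmain
  apply List.foldl_ext
  intro st x hx
  obtain ⟨hx1, hx2⟩ := (PySem.List.mem_pyRange_one).mp hx
  dsimp only
  set sumX : Int := st.2 + PySem.List.pyGetD S (x-1) 0 with hsumX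
  set xv : Int := PySem.List.pyGetD (pvXlist S) (x-1) 0 with hxv
  set L : Nat := ((S.length : Int) - 1 - x).toNat with hL
  have hLlen : L ≤ S.reverse.length := by simp [hL]; omega
  have hRange : PySem.List.pyRange 1 ((S.length : Int) - 1 - x + 1) 1
      = PySem.List.pyRange 1 ((L : Int) + 1) 1 := by
    by_cases hpos : 0 ≤ (S.length : Int) - 1 - x
    · congr 1; omega
    · rw [PySem.List.pyRange_one_eq_nil (by omega), PySem.List.pyRange_one_eq_nil (by omega)]
  rw [hRange, PySem.List.pyRange_one]
  have hlen : (((L : Int) + 1) - 1).toNat = L := by omega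
  rw [hlen, List.foldl_map]
  have hstep : ∀ (st2 : Int × Int), ∀ j ∈ List.range L,
      ((fun st2 y =>
          ((if sumX + (st2.2 + PySem.List.pyGetD S (-y) 0) ≤ k then
              max st2.1 (xv + PySem.List.pyGetD (pvXlist S.reverse) (y-1) 0)
            else st2.1), st2.2 + PySem.List.pyGetD S (-y) 0)) st2 (1 + (j : Int)))
      = ((if sumX + (st2.2 + S.reverse.getD j 0) ≤ k then
            max st2.1 (xv + pvZT S.reverse j) else st2.1), st2.2 + S.reverse.getD j 0) := by
    intro st2 j hj
    have hjL : j < L := List.mem_range.mp hj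
    have hjS : j < S.length := by omega
    have hneg : (-(1 + (j : Int))) = (-(((j+1) : Nat) : Int)) := by omega
    have hidx : (1 + (j : Int) - 1) = ((j : Nat) : Int) := by omega
    beta_reduce
    rw [hneg, pv_neg_get S j hjS, hidx, PySem.List.pyGetD_natCast,
      pvXlist_getD S.reverse j (by simpa using hjS)]
  rw [List.foldl_ext _ _ _ hstep, pv_inner_eq S.reverse k sumX xv L hLlen st.1,
    firstFeasible_eq S.reverse (k - sumX) L hLlen]
  cases hff : pvFF S.reverse (k - sumX) L with
  | none => simp
  | some y =>
    obtain ⟨hy1, hyL⟩ := pvFF_bounds _ _ L y hff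
    have hyidx : ((y : Nat) : Int) - 1 = ((y - 1 : Nat) : Int) := by omega
    simp only []
    rw [hyidx, PySem.List.pyGetD_natCast, pvXlist_getD S.reverse (y-1) (by simp; omega)]

theorem pv_port_eq (S : List Int) (k : Int) : contaZeroN2 S k = contaZeroN2_alt S k := by
  unfold contaZeroN2 contaZeroN2_alt
  simp only [pvAxz_eq, pvAyz_eq, pvBxz_eq, pvByz_eq]
  rw [pvmain_eq]

-- ===== VERDICT (by name: the statement is the Claim_ definition above) =====
theorem contaZeroN2_spec : Claim_equal_contaZeroN2 := by
  intro S k _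
  unfold Spec_contaZeroN2
  exact pv_port_eq S k
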